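-- pv_equiv track=rewrite | github.com/yichao-yuan-99/Vortex | scripts/dynio/tocsv.py | splitOut
-- ===== SOURCE A (Python) =====
-- def splitOut(out):
--   split = []
--   for i, line in enumerate(out):
--     if line[:3] == '@@@':
--       split.append((i, line[3:].strip()))
--
--   r = {}
--   split.append((len(out), 'End'))
--   for i in range(len(split) - 1):
--     beg, name = split[i]
--     end, _ = split[i + 1]
--     r[name] = out[beg + 1:end]
--
--   return r
-- ===== SOURCE B (Python) =====
-- def splitOut(out):
--   r = {}
--   cur = None
--   for line in out:
--     if line[:3] == '@@@':
--       cur = line[3:].strip()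
--       r[cur] = []
--     elif cur is not None:
--       r[cur].append(line)
--   return r
-- ===== Notes on version B (the rewrite author's own statement) =====
-- stated objective: simpler
-- what changed: B replaces A's two-phase scheme (collect marker indices, append an End sentinel, slice the list between consecutive markers) by a single pass that tracks the current section name and appends each non-marker line to it directly.
import Mathlib
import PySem

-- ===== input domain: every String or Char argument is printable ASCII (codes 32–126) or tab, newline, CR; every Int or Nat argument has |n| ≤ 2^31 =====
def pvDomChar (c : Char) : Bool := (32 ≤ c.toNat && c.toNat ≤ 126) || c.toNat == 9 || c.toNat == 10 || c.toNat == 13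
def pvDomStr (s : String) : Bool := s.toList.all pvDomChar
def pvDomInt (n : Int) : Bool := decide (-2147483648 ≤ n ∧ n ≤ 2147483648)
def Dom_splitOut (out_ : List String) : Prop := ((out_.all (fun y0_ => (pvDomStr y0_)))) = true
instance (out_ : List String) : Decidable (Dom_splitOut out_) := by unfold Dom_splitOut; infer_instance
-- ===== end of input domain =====

-- B replaces A's marker-index list + End sentinel + slicing by one pass that accumulates
-- lines into the currently open section (objective: simpler).

-- shared tiny helpers: both Pythons compute line[:3] == '@@@' and line[3:].strip()
def pvIsMarker (l : String) : Bool := PySem.Str.slice l none (some 3) == "@@@"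
def pvName (l : String) : String := PySem.Str.strip (PySem.Str.slice l (some 3) none)

-- ===== PORT A =====
def splitOut (out_ : List String) : List (String × List String) :=
  let split : List (Int × String) :=
    (PySem.List.enumerate out_).foldl
      (fun acc p => if pvIsMarker p.2 then acc ++ [(p.1, pvName p.2)] else acc) []
  let split2 := split ++ [((out_.length : Int), "End")]
  let r : PySem.Dict String (List String) :=
    (PySem.List.pyRange 0 ((split2.length : Int) - 1) 1).foldl
      (fun r i =>
        -- split[i] / split[i+1]: the index is always in range, so the default is never used
        (fun bn en => r.insert bn.2 (PySem.List.slice out_ (some (bn.1 + 1)) (some en.1)))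
          (PySem.List.pyGetD split2 i ((0 : Int), ""))
          (PySem.List.pyGetD split2 (i + 1) ((0 : Int), "")))
      PySem.Dict.empty
  r.items

-- ===== PORT B =====
def splitOut_alt (out_ : List String) : List (String × List String) :=
  let st : PySem.Dict String (List String) × Option String :=
    out_.foldl
      (fun st line =>
        if pvIsMarker line then
          (st.1.insert (pvName line) [], some (pvName line))
        else
          match st.2 with
          | some c => (st.1.modify c [] (fun v => v ++ [line]), st.2)
          | none => st)
      (PySem.Dict.empty, none)
  st.1.items

-- ===== PRECONDITION & SPEC =====
def Spec_splitOut (out_ : List String) (out : List (String × List String)) : Prop := out = splitOut_alt out_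
instance (out_ : List String) (out : List (String × List String)) : Decidable (Spec_splitOut out_ out) := by unfold Spec_splitOut; infer_instance

-- ===== CLAIM (what is proved, stated in full; the proofs are below) =====
def Claim_equal_splitOut : Prop := ∀ (out_ : List String), Dom_splitOut out_ → Spec_splitOut out_ (splitOut out_)

-- ===== LEMMAS AND PROOFS =====

-- markers of a suffix, with absolute indices starting at s
def pvMK : List String → Nat → List (Int × String)
  | [], _ => []
  | l :: ls, s => (if pvIsMarker l then [((s : Int), pvName l)] else []) ++ pvMK ls (s + 1)

-- the sections of a line list: each marker opens a section holding the following non-marker lines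
def pvRaw : List String → List (String × List String)
  | [] => []
  | l :: ls =>
    if pvIsMarker l then (pvName l, ls.takeWhile (fun x => !pvIsMarker x)) :: pvRaw ls
    else pvRaw ls

def pvIns (d : PySem.Dict String (List String)) (p : String × List String) : PySem.Dict String (List String) :=
  d.insert p.1 p.2

lemma pvA1 (xs : List String) : ∀ (s : Nat) (acc : List (Int × String)),
    (PySem.List.enumerate xs (s : Int)).foldl
      (fun acc p => if pvIsMarker p.2 then acc ++ [(p.1, pvName p.2)] else acc) acc
    = acc ++ pvMK xs s := by
  induction xs with
  | nil => intro s acc; simp [PySem.List.enumerate_nil, pvMK]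
  | cons x xs ih =>
    intro s acc
    rw [PySem.List.enumerate_cons]
    have hcast : (s : Int) + 1 = ((s + 1 : Nat) : Int) := by push_cast; ring
    by_cases h : pvIsMarker x
    · simp only [List.foldl_cons, h, if_true, hcast, ih (s + 1)]
      simp [pvMK, h]
    · simp only [List.foldl_cons, h, if_false, hcast, ih (s + 1)]
      simp [pvMK, h]

lemma pvIdxZip {α β : Type} (step : β → α → α → β) (dflt : α) :
    ∀ (m : Nat) (l : List α) (k : Nat) (r : β), l.length - k = m →
    (PySem.List.pyRange (k : Int) ((l.length : Int) - 1) 1).foldl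
        (fun r i => step r (PySem.List.pyGetD l i dflt) (PySem.List.pyGetD l (i + 1) dflt)) r
    = ((l.drop k).zip (l.drop (k + 1))).foldl (fun r p => step r p.1 p.2) r := by
  intro m
  induction m with
  | zero =>
    intro l k r hm
    have hk : l.length ≤ k := by omega
    rw [PySem.List.pyRange_one_eq_nil (by push_cast; omega)]
    rw [List.drop_eq_nil_of_le (show l.length ≤ k by omega)]
    simp
  | succ m ih =>
    intro l k r hm
    by_cases hk : k + 1 < l.length
    · rw [PySem.List.pyRange_one_cons (by push_cast; omega)]
      have h1 : PySem.List.pyGetD l (k : Int) dflt = l[k] := by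
        rw [PySem.List.pyGetD_of_nonneg _ _ (by positivity)]
        simp only [Int.toNat_natCast]
        rw [List.getD_eq_getElem _ _ (by omega)]
      have h2 : PySem.List.pyGetD l ((k : Int) + 1) dflt = l[k + 1] := by
        have : (k : Int) + 1 = ((k + 1 : Nat) : Int) := by push_cast; ring
        rw [this, PySem.List.pyGetD_of_nonneg _ _ (by positivity)]
        simp only [Int.toNat_natCast]
        rw [List.getD_eq_getElem _ _ (by omega)]
      have hd1 : l.drop k = l[k] :: l.drop (k + 1) := List.drop_eq_getElem_cons (by omega)
      have hd2 : l.drop (k + 1) = l[k + 1] :: l.drop (k + 2) := List.drop_eq_getElem_cons (by omega)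
      have hcast : (k : Int) + 1 = ((k + 1 : Nat) : Int) := by push_cast; ring
      rw [List.foldl_cons, h1, h2, hcast, ih l (k + 1) _ (by omega)]
      conv_rhs => rw [hd1]
      rw [hd2, List.zip_cons_cons, List.foldl_cons]
    · rw [PySem.List.pyRange_one_eq_nil (by push_cast; omega)]
      rw [List.drop_eq_nil_of_le (show l.length ≤ k + 1 by omega), List.zip_nil_right]
      simp

lemma pvMK_ge (ls : List String) : ∀ (s : Nat) (p : Int × String), p ∈ pvMK ls s → (s : Int) ≤ p.1 := by
  induction ls with
  | nil => intro s p hp; simp [pvMK] at hp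
  | cons x xs ih =>
    intro s p hp
    simp only [pvMK, List.mem_append] at hp
    rcases hp with hp | hp
    · by_cases h : pvIsMarker x
      · simp [h] at hp; subst hp; simp
      · simp [h] at hp
    · have := ih (s + 1) p hp
      push_cast at this ⊢; omega

lemma pvFH (ls : List String) : ∀ (j : Nat) (out : List String), out.drop (j + 1) = ls →
    PySem.List.slice out (some ((j : Int) + 1))
        (some ((pvMK ls (j + 1) ++ [((out.length : Int), "End")]).headI.1))
    = ls.takeWhile (fun x => !pvIsMarker x) := by
  induction ls with
  | nil =>
    intro j out hd
    have hlen : out.length ≤ j + 1 := by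
      have h := congrArg List.length hd; simp at h; omega
    simp only [pvMK, List.nil_append, List.headI]
    have : (j : Int) + 1 = ((j + 1 : Nat) : Int) := by push_cast; ring
    rw [this, PySem.List.slice_natCast]
    rw [hd]; simp
  | cons x xs ih =>
    intro j out hd
    by_cases h : pvIsMarker x
    · simp only [pvMK, h, if_true, List.singleton_append, List.cons_append, List.headI]
      have : (j : Int) + 1 = ((j + 1 : Nat) : Int) := by push_cast; ring
      rw [this, PySem.List.slice_natCast]
      simp [List.takeWhile_cons, h]
    · -- x is not a marker: head index is ≥ j + 2, the slice starts with x
      simp only [pvMK, h]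
      simp only [Bool.false_eq_true, if_false, List.nil_append,
        show j + 1 + 1 = j + 2 from rfl]
      have hd2 : out.drop (j + 2) = xs := by
        have : out.drop (j + 2) = (out.drop (j + 1)).drop 1 := by
          rw [List.drop_drop]
        rw [this, hd]; simp
      have hlen : out.length = j + 2 + xs.length := by
        have h := congrArg List.length hd; simp at h; omega
      set rest := pvMK xs (j + 2) ++ [((out.length : Int), "End")] with hrest
      have hge : ((j : Int) + 2) ≤ rest.headI.1 := by
        rcases hM : pvMK xs (j + 2) with _ | ⟨p, ps⟩
        · simp only [hrest, hM, List.nil_append, List.headI]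
          push_cast; omega
        · have : p ∈ pvMK xs (j + 2) := by rw [hM]; simp
          have := pvMK_ge xs (j + 2) p this
          simp only [hrest, hM, List.cons_append, List.headI]
          push_cast at this ⊢; omega
      have hnn : 0 ≤ rest.headI.1 := by omega
      have hcast : rest.headI.1 = ((rest.headI.1.toNat : Nat) : Int) := by omega
      set hn := rest.headI.1.toNat with hhn
      have hge' : j + 2 ≤ hn := by omega
      have e1 : PySem.List.slice out (some ((j : Int) + 1)) (some rest.headI.1)
          = (out.drop (j + 1)).take (hn - (j + 1)) := by
        have : (j : Int) + 1 = ((j + 1 : Nat) : Int) := by push_cast; ring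
        rw [this, hcast, PySem.List.slice_natCast]
      have e2 : PySem.List.slice out (some (((j + 1 : Nat) : Int) + 1)) (some rest.headI.1)
          = (out.drop (j + 2)).take (hn - (j + 2)) := by
        have : ((j + 1 : Nat) : Int) + 1 = ((j + 2 : Nat) : Int) := by push_cast; ring
        rw [this, hcast, PySem.List.slice_natCast]
      have ihx := ih (j + 1) out hd2
      rw [e2] at ihx
      rw [e1, hd]
      have htake : hn - (j + 1) = (hn - (j + 2)) + 1 := by omega
      rw [htake, List.take_succ_cons]
      have htw : List.takeWhile (fun x => !pvIsMarker x) (x :: xs)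
          = x :: List.takeWhile (fun x => !pvIsMarker x) xs := by
        simp [List.takeWhile_cons, h]
      rw [htw, ← ihx, ← hd2]

lemma pvL (t : List String) : ∀ (j : Nat) (out : List String), out.drop j = t →
    ((pvMK t j ++ [((out.length : Int), "End")]).zip
        ((pvMK t j ++ [((out.length : Int), "End")]).drop 1)).map
      (fun p => (p.1.2, PySem.List.slice out (some (p.1.1 + 1)) (some p.2.1)))
    = pvRaw t := by
  induction t with
  | nil => intro j out hd; simp [pvMK, pvRaw]
  | cons l ls ih =>
    intro j out hd
    have hd1 : out.drop (j + 1) = ls := by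
      have : out.drop (j + 1) = (out.drop j).drop 1 := by rw [List.drop_drop]
      rw [this, hd]; simp
    by_cases h : pvIsMarker l
    · simp only [pvMK, h, if_true, List.singleton_append, pvRaw]
      have hfh := pvFH ls j out hd1
      have ihx := ih (j + 1) out hd1
      rcases hM : pvMK ls (j + 1) with _ | ⟨p, ps⟩ <;>
        rw [hM] at ihx hfh <;>
        simp only [List.cons_append, List.nil_append, List.drop_one, List.tail_cons,
          List.zip_cons_cons, List.zip_nil_right, List.map_cons, List.map_nil,
          List.headI] at ihx hfh ⊢
      · rw [hfh, ← ihx]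
      · rw [hfh]
        rw [← ihx]
    · simp only [pvMK, h, if_false, List.nil_append, pvRaw]
      exact ih (j + 1) out hd1

-- A computes the insert-fold over the section list
lemma pvA_eq (out_ : List String) :
    splitOut out_ = ((pvRaw out_).foldl pvIns PySem.Dict.empty).items := by
  have hA1 : (PySem.List.enumerate out_).foldl
      (fun acc p => if pvIsMarker p.2 then acc ++ [(p.1, pvName p.2)] else acc) []
      = pvMK out_ 0 := by
    have := pvA1 out_ 0 []
    simpa using this
  simp only [splitOut]
  rw [hA1]
  set l2 := pvMK out_ 0 ++ [((out_.length : Int), "End")] with hl2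
  have hz := pvIdxZip
      (fun (r : PySem.Dict String (List String)) (bn en : Int × String) =>
        r.insert bn.2 (PySem.List.slice out_ (some (bn.1 + 1)) (some en.1)))
      ((0 : Int), "") l2.length l2 0 PySem.Dict.empty (by omega)
  simp only [Nat.cast_zero, List.drop_zero] at hz
  rw [hz]
  have hL := pvL out_ 0 out_ (by simp)
  rw [← hL, List.foldl_map]
  rfl

-- the step function of B's single pass
def pvBStep (st : PySem.Dict String (List String) × Option String) (line : String) :
    PySem.Dict String (List String) × Option String :=
  if pvIsMarker line then
    (st.1.insert (pvName line) [], some (pvName line))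
  else
    match st.2 with
    | some c => (st.1.modify c [] (fun v => v ++ [line]), st.2)
    | none => st

lemma pvModifyInsert (d : PySem.Dict String (List String)) (k : String) (v : List String)
    (f : List String → List String) : (d.insert k v).modify k [] f = d.insert k (f v) := by
  simp [PySem.Dict.modify, PySem.Dict.getD_insert_self, PySem.Dict.insert_insert_self]

lemma pvB1 (xs : List String) : ∀ (d : PySem.Dict String (List String)) (c : String)
    (acc : List String),
    (xs.foldl pvBStep (d.insert c acc, some c)).1
    = (pvRaw xs).foldl pvIns (d.insert c (acc ++ xs.takeWhile (fun x => !pvIsMarker x))) := by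
  induction xs with
  | nil => intro d c acc; simp [pvRaw]
  | cons l ls ih =>
    intro d c acc
    by_cases h : pvIsMarker l
    · rw [List.foldl_cons]
      have hstep : pvBStep (d.insert c acc, some c) l
          = ((d.insert c acc).insert (pvName l) [], some (pvName l)) := by
        simp [pvBStep, h]
      rw [hstep, ih (d.insert c acc) (pvName l) []]
      simp only [pvRaw, h, if_true, List.takeWhile_cons, Bool.not_true, List.foldl_cons]
      simp [pvIns]
    · rw [List.foldl_cons]
      have hstep : pvBStep (d.insert c acc, some c) l
          = (d.insert c (acc ++ [l]), some c) := by
        simp [pvBStep, h, pvModifyInsert]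
      rw [hstep, ih d c (acc ++ [l])]
      simp only [pvRaw, h, if_false, List.takeWhile_cons, Bool.not_false, if_true]
      rw [List.append_assoc]
      simp
  
lemma pvB0 (xs : List String) : ∀ (d : PySem.Dict String (List String)),
    (xs.foldl pvBStep (d, none)).1 = (pvRaw xs).foldl pvIns d := by
  induction xs with
  | nil => intro d; simp [pvRaw]
  | cons l ls ih =>
    intro d
    by_cases h : pvIsMarker l
    · rw [List.foldl_cons]
      have hstep : pvBStep (d, none) l = (d.insert (pvName l) [], some (pvName l)) := by
        simp [pvBStep, h]
      rw [hstep]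
      have := pvB1 ls d (pvName l) []
      simp only [List.nil_append] at this
      rw [this]
      simp [pvRaw, h, pvIns]
    · rw [List.foldl_cons]
      have hstep : pvBStep (d, none) l = (d, none) := by simp [pvBStep, h]
      rw [hstep, ih d]
      simp [pvRaw, h]

lemma pvB_eq (out_ : List String) :
    splitOut_alt out_ = ((pvRaw out_).foldl pvIns PySem.Dict.empty).items := by
  show (out_.foldl pvBStep (PySem.Dict.empty, none)).1.items = _
  rw [pvB0]

-- ===== VERDICT (by name: the statement is the Claim_ definition above) =====
theorem splitOut_spec : Claim_equal_splitOut := by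
  intro out_ _
  unfold Spec_splitOut
  rw [pvA_eq, pvB_eq]
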